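-- pv_equiv track=rewrite | github.com/MaverickTheDude/python-aoc-2018 | 2-IMS.py | calculateSymbols
-- ===== SOURCE A (Python) =====
-- def calculateSymbols(string: str) -> tuple:
--     a = 0
--     b = 0
--     cont = dict()
--     for x in string:
--         if x in cont:   cont[x] += 1
--         else:           cont[x] = 1
--     if 2 in cont.values():  a = 1
--     if 3 in cont.values():  b = 1
--     return a, b
-- ===== SOURCE B (Python) =====
-- def calculateSymbols(string: str) -> tuple:
--     counts = {string.count(c) for c in set(string)}
--     return (1 if 2 in counts else 0, 1 if 3 in counts else 0)
-- ===== Notes on version B (the rewrite author's own statement) =====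
-- stated objective: simpler
-- what changed: Replaces the hand-built occurrence dict and two value scans by a set comprehension of per-distinct-character string.count values with two membership tests.
import Mathlib
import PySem

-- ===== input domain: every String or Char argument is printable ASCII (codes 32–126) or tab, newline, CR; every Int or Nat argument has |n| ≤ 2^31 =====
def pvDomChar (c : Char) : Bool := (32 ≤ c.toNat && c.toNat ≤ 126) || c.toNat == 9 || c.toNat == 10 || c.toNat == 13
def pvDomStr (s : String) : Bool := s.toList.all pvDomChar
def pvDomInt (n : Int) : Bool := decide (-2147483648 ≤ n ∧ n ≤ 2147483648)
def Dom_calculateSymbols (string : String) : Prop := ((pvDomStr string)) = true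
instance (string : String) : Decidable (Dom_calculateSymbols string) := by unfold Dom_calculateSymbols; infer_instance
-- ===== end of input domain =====

-- B replaces A's hand-built occurrence dict and two value scans by a set of per-distinct-character counts (simpler; not faster).

-- ===== PORT A =====
def calculateSymbols (string : String) : Int × Int :=
  let a : Int := 0
  let b : Int := 0
  let cont : PySem.Dict Char Int :=
    string.toList.foldl
      (fun d x => if d.contains x then d.insert x (d.getD x 0 + 1) else d.insert x 1)
      PySem.Dict.empty
  let a := if cont.values.contains 2 then (1 : Int) else a
  let b := if cont.values.contains 3 then (1 : Int) else b
  (a, b)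

-- ===== PORT B =====
def calculateSymbols_alt (string : String) : Int × Int :=
  let l := string.toList
  let counts : PySem.Set Int :=
    PySem.Set.ofList ((PySem.Set.ofList l).map (fun c => (l.count c : Int)))
  (if PySem.Set.contains counts 2 then 1 else 0,
   if PySem.Set.contains counts 3 then 1 else 0)

-- ===== PRECONDITION & SPEC =====
def Spec_calculateSymbols (string : String) (out : Int × Int) : Prop := out = calculateSymbols_alt string
instance (string : String) (out : Int × Int) : Decidable (Spec_calculateSymbols string out) := by unfold Spec_calculateSymbols; infer_instance

-- ===== CLAIM (what is proved, stated in full; the proofs are below) =====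
def Claim_equal_calculateSymbols : Prop := ∀ (string : String), Dom_calculateSymbols string → Spec_calculateSymbols string (calculateSymbols string)

-- ===== LEMMAS AND PROOFS =====

theorem foldfn_eq : (fun (d : PySem.Dict Char Int) x => if d.contains x then d.insert x (d.getD x 0 + 1) else d.insert x 1)
    = (fun d x => d.insert x (d.getD x 0 + 1)) := by
  funext d x
  by_cases h : d.contains x = true
  · simp [h]
  · simp only [Bool.not_eq_true] at h
    rw [PySem.Dict.getD_of_not_contains d 0 h]
    simp [h]

theorem values_loop (l : List Char) :
    (l.foldl (fun d x => if d.contains x then d.insert x (d.getD x 0 + 1) else d.insert x 1)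
      PySem.Dict.empty).values = (PySem.Set.ofList l).map (fun c => (l.count c : Int)) := by
  rw [foldfn_eq, PySem.Dict.foldl_insert_getD_add_one_eq_counter]
  simp only [PySem.Dict.values, PySem.Dict.items_counter, List.map_map]
  rfl

theorem mem_shift (l : List Char) (n : Int) :
    ((l.foldl (fun d x => if d.contains x then d.insert x (d.getD x 0 + 1) else d.insert x 1)
      PySem.Dict.empty).values.contains n)
    = PySem.Set.contains (PySem.Set.ofList ((PySem.Set.ofList l).map (fun c => (l.count c : Int)))) n := by
  rw [values_loop]
  simp [PySem.Set.mem_ofList]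

-- ===== VERDICT (by name: the statement is the Claim_ definition above) =====
theorem calculateSymbols_spec : Claim_equal_calculateSymbols := by
  intro s _
  unfold Spec_calculateSymbols calculateSymbols calculateSymbols_alt
  simp only [mem_shift]
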